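-- pv_equiv track=rewrite | github.com/djmorgan26/up2d8 | packages/backend-api/api/rss_feeds.py | standardize_category
-- ===== SOURCE A (Python) =====
-- STANDARD_CATEGORIES = {
--     "Technology": ["technology", "tech news", "innovation", "gadgets", "technology news"],
--     "News": ["news", "general news", "current events", "breaking news"],
--     "Sports": ["sports", "athletics", "gaming"],
--     "Business": ["business", "finance", "economy"],
--     "Science": ["science", "research", "discovery"],
--     "Entertainment": ["entertainment", "movies", "music", "pop culture"],
--     "Lifestyle": ["lifestyle", "health", "wellness", "travel", "food"],
--     "Programming": ["programming", "coding", "software development", "web development"],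
--     "Art": ["art", "design", "culture"],
--     "Education": ["education", "learning", "academic"]
-- }
--
-- def standardize_category(raw_category: str | None) -> str:
--     if not raw_category:
--         return "Uncategorized"
--
--     # Clean and normalize the raw category
--     cleaned_category = raw_category.strip().lower()
--
--     # Attempt to match against standard categories
--     for standard_cat, synonyms in STANDARD_CATEGORIES.items():
--         if cleaned_category == standard_cat.lower() or cleaned_category in synonyms:
--             return standard_cat # Return the standardized, regular capitalized name
--
--     return raw_category.strip() # Return original if no match
-- ===== SOURCE B (Python) =====
-- STANDARD_CATEGORIES = {
--     "Technology": ["technology", "tech news", "innovation", "gadgets", "technology news"],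
--     "News": ["news", "general news", "current events", "breaking news"],
--     "Sports": ["sports", "athletics", "gaming"],
--     "Business": ["business", "finance", "economy"],
--     "Science": ["science", "research", "discovery"],
--     "Entertainment": ["entertainment", "movies", "music", "pop culture"],
--     "Lifestyle": ["lifestyle", "health", "wellness", "travel", "food"],
--     "Programming": ["programming", "coding", "software development", "web development"],
--     "Art": ["art", "design", "culture"],
--     "Education": ["education", "learning", "academic"]
-- }
--
-- # Precomputed reverse lookup: every synonym and every lowercased standard name -> canonical name.
-- # setdefault keeps the first (earliest) category if a key ever appeared twice.
-- _REVERSE_MAP = {}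
-- for _cat, _syns in STANDARD_CATEGORIES.items():
--     for _key in [_cat.lower(), *_syns]:
--         _REVERSE_MAP.setdefault(_key, _cat)
--
--
-- def standardize_category(raw_category):
--     if not raw_category:
--         return "Uncategorized"
--     cleaned = raw_category.strip().lower()
--     return _REVERSE_MAP.get(cleaned, raw_category.strip())
-- ===== Notes on version B (the rewrite author's own statement) =====
-- stated objective: idiomatic
-- what changed: Replaces the per-call linear scan over all categories and their synonym lists with a module-level reverse-lookup dict built once, so each call is a single dict lookup.
import Mathlib
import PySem

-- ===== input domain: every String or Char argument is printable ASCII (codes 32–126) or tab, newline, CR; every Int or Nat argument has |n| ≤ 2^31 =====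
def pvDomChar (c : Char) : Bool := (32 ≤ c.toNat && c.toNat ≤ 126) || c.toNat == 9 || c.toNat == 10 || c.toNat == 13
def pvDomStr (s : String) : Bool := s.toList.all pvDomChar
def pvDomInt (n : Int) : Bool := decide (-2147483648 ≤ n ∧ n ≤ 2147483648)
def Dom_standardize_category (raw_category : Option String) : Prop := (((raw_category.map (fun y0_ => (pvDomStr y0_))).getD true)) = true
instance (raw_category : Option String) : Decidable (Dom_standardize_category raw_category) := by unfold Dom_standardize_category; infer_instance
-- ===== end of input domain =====

-- B replaces A's per-call linear scan over categories with a reverse-lookup dict built once (one lookup per call).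


-- the module constant STANDARD_CATEGORIES (insertion order of the Python dict)
def STANDARD_CATEGORIES : List (String × List String) := [
  ("Technology", ["technology", "tech news", "innovation", "gadgets", "technology news"]),
  ("News", ["news", "general news", "current events", "breaking news"]),
  ("Sports", ["sports", "athletics", "gaming"]),
  ("Business", ["business", "finance", "economy"]),
  ("Science", ["science", "research", "discovery"]),
  ("Entertainment", ["entertainment", "movies", "music", "pop culture"]),
  ("Lifestyle", ["lifestyle", "health", "wellness", "travel", "food"]),
  ("Programming", ["programming", "coding", "software development", "web development"]),
  ("Art", ["art", "design", "culture"]),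
  ("Education", ["education", "learning", "academic"])]

-- ===== PORT A =====
-- the for-loop of A: first category whose lowered name equals cleaned or whose synonyms contain it
def pvLoopA (cleaned : String) : List (String × List String) → Option String
  | [] => none
  | e :: rest =>
      if cleaned = PySem.Str.lower e.1 ∨ cleaned ∈ e.2 then some e.1 else pvLoopA cleaned rest

def standardize_category (raw_category : Option String) : String :=
  match raw_category with
  | none => "Uncategorized"
  | some s =>
    if s = "" then "Uncategorized"
    else
      let cleaned := PySem.Str.lower (PySem.Str.strip s)
      match pvLoopA cleaned STANDARD_CATEGORIES with
      | some cat => cat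
      | none => PySem.Str.strip s

-- ===== PORT B =====
-- module-level reverse map: each key (lowered name or synonym) -> canonical category, first writer wins
def pvReverseMap : PySem.Dict String String :=
  STANDARD_CATEGORIES.foldl
    (fun d e => (PySem.Str.lower e.1 :: e.2).foldl (fun d k => d.setdefault k e.1) d)
    PySem.Dict.empty

def standardize_category_alt (raw_category : Option String) : String :=
  match raw_category with
  | none => "Uncategorized"
  | some s =>
    if s = "" then "Uncategorized"
    else
      let cleaned := PySem.Str.lower (PySem.Str.strip s)
      (pvReverseMap.get? cleaned).getD (PySem.Str.strip s)

-- ===== PRECONDITION & SPEC =====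
def Spec_standardize_category (raw_category : Option String) (out : String) : Prop := out = standardize_category_alt raw_category
instance (raw_category : Option String) (out : String) : Decidable (Spec_standardize_category raw_category out) := by unfold Spec_standardize_category; infer_instance

-- ===== CLAIM (what is proved, stated in full; the proofs are below) =====
def Claim_equal_standardize_category : Prop := ∀ (raw_category : Option String), Dom_standardize_category raw_category → Spec_standardize_category raw_category (standardize_category raw_category)

-- ===== LEMMAS AND PROOFS =====

-- the flattened (key, category) association list that A's scan effectively searches
def pvFull : List (String × String) :=
  STANDARD_CATEGORIES.flatMap (fun e => (PySem.Str.lower e.1 :: e.2).map (fun k => (k, e.1)))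

-- Dict.get? is the first-match lookup on the items list
lemma dict_get_eq_find (d : PySem.Dict String String) (k : String) :
    d.get? k = (d.items.find? (fun p => p.1 == k)).map (·.2) := by
  cases d with
  | mk items =>
    induction items with
    | nil => rfl
    | cons p rest ih =>
      cases p with
      | mk a b =>
        by_cases h : a = k
        · simp [PySem.Dict.get?_mk_cons, h, List.find?]
        · have hb : (a == k) = false := by simpa using h
          simp [PySem.Dict.get?_mk_cons, hb, List.find?, ih]

-- A's scan is the first-match lookup on the flattened list
lemma loopA_eq_find (c : String) (L : List (String × List String)) :
    pvLoopA c L =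
      ((L.flatMap (fun e => (PySem.Str.lower e.1 :: e.2).map (fun k => (k, e.1)))).find?
        (fun p => p.1 == c)).map (·.2) := by
  induction L with
  | nil => rfl
  | cons e rest ih =>
    rw [List.flatMap_cons, List.find?_append, List.find?_map]
    by_cases h : c = PySem.Str.lower e.1 ∨ c ∈ e.2
    · have hmem : c ∈ PySem.Str.lower e.1 :: e.2 := by
        rcases h with h | h
        · exact h ▸ List.mem_cons_self
        · exact List.mem_cons_of_mem _ h
      have hsome : (List.find? ((fun p => p.1 == c) ∘ fun k => (k, e.1))
          (PySem.Str.lower e.1 :: e.2)).isSome := by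
        rw [List.find?_isSome]
        exact ⟨c, hmem, by simp [Function.comp]⟩
      obtain ⟨k, hk⟩ := Option.isSome_iff_exists.mp hsome
      simp [pvLoopA, h, hk]
    · have hnone : List.find? ((fun p => p.1 == c) ∘ fun k => (k, e.1))
          (PySem.Str.lower e.1 :: e.2) = none := by
        rw [List.find?_eq_none]
        intro k hk
        simp only [Function.comp, beq_iff_eq]
        intro hkc
        subst hkc
        exact h (List.mem_cons.mp hk)
      simp [pvLoopA, h, hnone, ih]

-- two association lists with the same key set, one a subset of the other, and a functional
-- key→value relation on the larger, have identical first-match lookups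
lemma lookup_agree (R R' : List (String × String))
    (h1 : ∀ p ∈ R', p ∈ R)
    (h2 : ∀ p ∈ R, p.1 ∈ R'.map (·.1))
    (hf : ∀ p ∈ R, ∀ q ∈ R, p.1 = q.1 → p.2 = q.2) (c : String) :
    (R'.find? (fun p => p.1 == c)).map (·.2) = (R.find? (fun p => p.1 == c)).map (·.2) := by
  cases hq : R.find? (fun p => p.1 == c) with
  | none =>
    have hnone : R'.find? (fun p => p.1 == c) = none := by
      rw [List.find?_eq_none] at hq ⊢
      exact fun p hp => hq p (h1 p hp)
    simp [hnone]
  | some q =>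
    have hqmem : q ∈ R := List.mem_of_find?_eq_some hq
    have hqc : q.1 = c := by simpa using List.find?_some hq
    have hkey : q.1 ∈ R'.map (·.1) := h2 q hqmem
    obtain ⟨p, hpR', hpk⟩ := List.mem_map.mp hkey
    have hsome : (R'.find? (fun p => p.1 == c)).isSome := by
      rw [List.find?_isSome]
      exact ⟨p, hpR', by simp [hpk, hqc]⟩
    obtain ⟨r, hr⟩ := Option.isSome_iff_exists.mp hsome
    have hrmem : r ∈ R := h1 r (List.mem_of_find?_eq_some hr)
    have hrc : r.1 = c := by simpa using List.find?_some hr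
    have : r.2 = q.2 := hf r hrmem q hqmem (hrc.trans hqc.symm)
    simp [hr, this]

-- the three closed facts about the two literal tables
set_option maxRecDepth 40000 in
lemma table_h1 : ∀ p ∈ pvReverseMap.items, p ∈ pvFull := by decide
set_option maxRecDepth 40000 in
lemma table_h2 : ∀ p ∈ pvFull, p.1 ∈ pvReverseMap.items.map (·.1) := by decide
set_option maxRecDepth 40000 in
lemma table_hf : ∀ p ∈ pvFull, ∀ q ∈ pvFull, p.1 = q.1 → p.2 = q.2 := by decide

-- ===== VERDICT (by name: the statement is the Claim_ definition above) =====
theorem standardize_category_spec : Claim_equal_standardize_category := by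
  intro raw _
  unfold Spec_standardize_category standardize_category standardize_category_alt
  cases raw with
  | none => rfl
  | some s =>
    by_cases hs : s = ""
    · simp [hs]
    · simp only [hs, if_false]
      rw [dict_get_eq_find, loopA_eq_find,
        lookup_agree pvFull pvReverseMap.items table_h1 table_h2 table_hf]
      rw [show (STANDARD_CATEGORIES.flatMap
            (fun e => (PySem.Str.lower e.1 :: e.2).map (fun k => (k, e.1)))) = pvFull from rfl]
      cases (pvFull.find? (fun p => p.1 == PySem.Str.lower (PySem.Str.strip s))).map (·.2) with
      | none => rfl
      | some cat => rfl
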